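-- pv_equiv track=rewrite | github.com/MjnhSK/Terraria-ChatBot | utils/boss_stats_utils.py | coin_splitter
-- ===== SOURCE A (Python) =====
-- def coin_splitter(text):
--     coin_mapping = {
--         'PC': 'Platinum Coin',
--         'GC': 'Gold Coin',
--         'SC': 'Silver Coin',
--         'CC': 'Copper Coin'
--     }
--
--     # Define the coin hierarchy (higher to lower)
--     hierarchy = {
--         'PC': -1,  # Platinum Coin is the highest
--         'GC': -2,  # Gold Coin
--         'SC': -3,  # Silver Coin
--         'CC': -4   # Copper Coin is the lowest
--     }
--
--     split_text = text.split(' ')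
--     previous = ''
--     current = ''
--     idx_list = []
--     idx_cummulate = []
--     for i in range(len(split_text)):
--         current = split_text[i]
--
--         if(previous in hierarchy and current in hierarchy):
--             if(hierarchy[previous] <= hierarchy[current]):
--                 idx_list.append(i-1)
--
--         if(current in hierarchy):
--             previous = current
--
--     for i in range(len(idx_list)):
--         idx = idx_list[i]+i
--         split_text.insert(idx, ',')
--
--     # Map abbreviations to full names using coin_mapping
--     mapped_text = []
--     for token in split_text:
--         if token in coin_mapping:
--             mapped_text.append(coin_mapping[token])  # Replace abbreviation with full name
--         else:
--             mapped_text.append(token)  # Keep the original token (quantities, commas)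
--
--     return ' '.join(mapped_text)
-- ===== SOURCE B (Python) =====
-- def coin_splitter(text):
--     coin_mapping = {
--         'PC': 'Platinum Coin',
--         'GC': 'Gold Coin',
--         'SC': 'Silver Coin',
--         'CC': 'Copper Coin'
--     }
--     hierarchy = {'PC': -1, 'GC': -2, 'SC': -3, 'CC': -4}
--     out = []
--     previous = ''
--     for token in text.split(' '):
--         if previous in hierarchy and token in hierarchy and hierarchy[previous] <= hierarchy[token]:
--             out.insert(len(out) - 1, ',')
--         out.append(coin_mapping.get(token, token))
--         if token in hierarchy:
--             previous = token
--     return ' '.join(out)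
-- ===== Notes on version B (the rewrite author's own statement) =====
-- stated objective: simpler
-- what changed: A's three passes (collect comma indices, re-insert them with cumulative +i offsets, then map abbreviations) are replaced by a single pass that, when the hierarchy condition fires, inserts a comma token before the last emitted token and maps each token as it is appended.
import Mathlib
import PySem

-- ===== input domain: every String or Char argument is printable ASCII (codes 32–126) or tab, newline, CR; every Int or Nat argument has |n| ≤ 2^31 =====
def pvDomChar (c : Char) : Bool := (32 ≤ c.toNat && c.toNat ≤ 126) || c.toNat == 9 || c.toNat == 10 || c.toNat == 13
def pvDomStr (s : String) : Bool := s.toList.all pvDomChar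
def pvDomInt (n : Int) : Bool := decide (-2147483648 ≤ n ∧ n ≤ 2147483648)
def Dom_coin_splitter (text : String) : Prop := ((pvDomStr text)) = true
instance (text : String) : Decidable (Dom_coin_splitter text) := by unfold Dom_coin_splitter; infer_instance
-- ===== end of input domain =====

-- B replaces A's three passes (collect indices, re-insert commas with cumulative offsets, map) by one
-- pass that inserts each comma before the last emitted token and maps as it goes; objective: simpler.

-- the two literal dicts both Python versions define (insertion order as in the source)
def pvCoinMapping : PySem.Dict String String :=
  ((((PySem.Dict.empty).insert "PC" "Platinum Coin").insert "GC" "Gold Coin").insert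
    "SC" "Silver Coin").insert "CC" "Copper Coin"

def pvHierarchy : PySem.Dict String Int :=
  ((((PySem.Dict.empty).insert "PC" (-1)).insert "GC" (-2)).insert "SC" (-3)).insert "CC" (-4)

-- ===== PORT A =====
-- split_text[i] / idx_list[i] are always in range and hierarchy[...] is guarded by `contains`,
-- so pyGetD / Dict.getD with a default is exact; sep " " ≠ "" so split? is always `some`.
def coin_splitter (text : String) : String :=
  let split_text := (PySem.Str.split? text " ").getD []
  let loop1 := (PySem.List.pyRange 0 (split_text.length : Nat)).foldl
    (fun (s : String × List Int) i =>
      let current := PySem.List.pyGetD split_text i ""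
      let idx_list :=
        if pvHierarchy.contains s.1 && pvHierarchy.contains current then
          if pvHierarchy.getD s.1 0 ≤ pvHierarchy.getD current 0 then s.2 ++ [i - 1] else s.2
        else s.2
      let previous := if pvHierarchy.contains current then current else s.1
      (previous, idx_list)) ("", [])
  let idx_list := loop1.2
  let split_text2 := (PySem.List.pyRange 0 (idx_list.length : Nat)).foldl
    (fun acc i =>
      let idx := PySem.List.pyGetD idx_list i 0 + i
      PySem.List.insert acc idx ",") split_text
  let mapped_text := split_text2.foldl
    (fun acc token =>
      if pvCoinMapping.contains token then acc ++ [pvCoinMapping.getD token ""]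
      else acc ++ [token]) []
  PySem.Str.join " " mapped_text

-- ===== PORT B =====
def coin_splitter_alt (text : String) : String :=
  let st := ((PySem.Str.split? text " ").getD []).foldl
    (fun (s : List String × String) token =>
      let out :=
        if pvHierarchy.contains s.2 && pvHierarchy.contains token
            && decide (pvHierarchy.getD s.2 0 ≤ pvHierarchy.getD token 0) then
          PySem.List.insert s.1 ((s.1.length : Int) - 1) ","
        else s.1
      let out := out ++ [pvCoinMapping.getD token token]
      (out, if pvHierarchy.contains token then token else s.2))
    ([], "")
  PySem.Str.join " " st.1

-- ===== PRECONDITION & SPEC =====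
def Spec_coin_splitter (text : String) (out : String) : Prop := out = coin_splitter_alt text
instance (text : String) (out : String) : Decidable (Spec_coin_splitter text out) := by unfold Spec_coin_splitter; infer_instance

-- ===== CLAIM (what is proved, stated in full; the proofs are below) =====
def Claim_equal_coin_splitter : Prop := ∀ (text : String), Dom_coin_splitter text → Spec_coin_splitter text (coin_splitter text)

-- ===== LEMMAS AND PROOFS =====

-- the condition / previous-update / token-mapping both programs compute, as named functions
def pvCond (p t : String) : Bool :=
  pvHierarchy.contains p && pvHierarchy.contains t
    && decide (pvHierarchy.getD p 0 ≤ pvHierarchy.getD t 0)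

def pvUpd (p t : String) : String := if pvHierarchy.contains t then t else p

def pvMap (t : String) : String := pvCoinMapping.getD t t

-- A's loop-1 body / loop-2 body / B's loop body as named step functions (definitionally the lambdas in the ports)
def pvStep1 (s : String × List Int) (i : Int) (current : String) : String × List Int :=
  let idx_list :=
    if pvHierarchy.contains s.1 && pvHierarchy.contains current then
      if pvHierarchy.getD s.1 0 ≤ pvHierarchy.getD current 0 then s.2 ++ [i - 1] else s.2
    else s.2
  let previous := if pvHierarchy.contains current then current else s.1
  (previous, idx_list)

def pvStep2 (acc : List String) (i : Int) (j : Int) : List String :=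
  PySem.List.insert acc (j + i) ","

def pvStepB (s : List String × String) (token : String) : List String × String :=
  let out :=
    if pvHierarchy.contains s.2 && pvHierarchy.contains token
        && decide (pvHierarchy.getD s.2 0 ≤ pvHierarchy.getD token 0) then
      PySem.List.insert s.1 ((s.1.length : Int) - 1) ","
    else s.1
  let out := out ++ [pvCoinMapping.getD token token]
  (out, if pvHierarchy.contains token then token else s.2)

-- an indexed fold (what Python's `for i in range(len(xs)) : … xs[i] …` computes)
def pvZF {α σ : Type} (g : σ → Int → α → σ) : Int → List α → σ → σ
  | _, [], s => s
  | i, t :: ts, s => pvZF g (i + 1) ts (g s i t)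

-- the comma positions A's first loop records (absolute token index minus one)
def pvIdxs (p : String) (i : Int) : List String → List Int
  | [] => []
  | t :: ts => (if pvCond p t then [i - 1] else []) ++ pvIdxs (pvUpd p t) (i + 1) ts

-- the woven token list, raw (A's view, before mapping) and mapped (B's view)
def pvWvR (x p : String) : List String → List String
  | [] => [x]
  | t :: ts => (if pvCond p t then [","] else []) ++ x :: pvWvR t (pvUpd p t) ts

def pvWv (x p : String) : List String → List String
  | [] => [x]
  | t :: ts => (if pvCond p t then [","] else []) ++ x :: pvWv (pvMap t) (pvUpd p t) ts

-- `for i in range(len(pre++rest))` from i = len pre is the structural fold pvZF over rest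
theorem pvIdxFold {α σ : Type} (d : α) (g : σ → Int → α → σ) :
    ∀ (rest pre : List α) (s : σ),
      (PySem.List.pyRange (pre.length : Nat) (((pre ++ rest).length : Nat) : Int)).foldl
        (fun s i => g s i (PySem.List.pyGetD (pre ++ rest) i d)) s
      = pvZF g (pre.length : Nat) rest s := by
  intro rest
  induction rest with
  | nil =>
    intro pre s
    have h : PySem.List.pyRange (pre.length : Nat) (((pre ++ []).length : Nat) : Int) = [] := by
      simp [PySem.List.pyRange]
    rw [h]; rfl
  | cons t ts ih =>
    intro pre s
    rw [PySem.List.pyRange_one_cons (by simp)]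
    simp only [List.foldl_cons]
    have hget : PySem.List.pyGetD (pre ++ t :: ts) (pre.length : Nat) d = t := by
      rw [PySem.List.pyGetD_natCast]
      simp [List.getD]
    rw [hget]
    rw [show pvZF g ((pre.length : Nat) : Int) (t :: ts) s
        = pvZF g (((pre.length : Nat) : Int) + 1) ts (g s ((pre.length : Nat) : Int) t) from rfl]
    have hlist : pre ++ t :: ts = (pre ++ [t]) ++ ts := by simp
    have hlen : ((pre.length : Nat) : Int) + 1 = (((pre ++ [t]).length : Nat) : Int) := by
      simp
    rw [hlist, hlen]
    exact ih (pre ++ [t]) (g s ((pre.length : Nat) : Int) t)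

theorem pvZF1 : ∀ (ts : List String) (p : String) (acc : List Int) (i : Int),
    pvZF pvStep1 i ts (p, acc) = (ts.foldl pvUpd p, acc ++ pvIdxs p i ts) := by
  intro ts
  induction ts with
  | nil => intro p acc i; simp [pvZF, pvIdxs]
  | cons t ts ih =>
    intro p acc i
    show pvZF pvStep1 (i + 1) ts (pvStep1 (p, acc) i t) = _
    have hstep : pvStep1 (p, acc) i t = (pvUpd p t, acc ++ (if pvCond p t then [i - 1] else [])) := by
      simp only [pvStep1, pvCond, pvUpd]
      by_cases h1 : (pvHierarchy.contains p && pvHierarchy.contains t) = true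
      · by_cases h2 : pvHierarchy.getD p 0 ≤ pvHierarchy.getD t 0 <;> simp [h1, h2]
      · simp [h1]
    rw [hstep, ih]
    simp [pvIdxs, List.foldl_cons]

theorem pvIns : ∀ (ts : List String) (p x : String) (u : List String) (k i : Int),
    (u.length : Int) + 1 = i + k →
    pvZF pvStep2 k (pvIdxs p i ts) ((u ++ [x]) ++ ts) = u ++ pvWvR x p ts := by
  intro ts
  induction ts with
  | nil => intro p x u k i h; simp [pvIdxs, pvZF, pvWvR]
  | cons t ts ih =>
    intro p x u k i h
    by_cases hc : pvCond p t
    · have hidx : pvIdxs p i (t :: ts) = (i - 1) :: pvIdxs (pvUpd p t) (i + 1) ts := by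
        simp [pvIdxs, hc]
      rw [hidx]
      show pvZF pvStep2 (k + 1) _ (pvStep2 ((u ++ [x]) ++ t :: ts) k (i - 1)) = _
      have hins : pvStep2 ((u ++ [x]) ++ t :: ts) k (i - 1)
          = ((u ++ [",", x]) ++ [t]) ++ ts := by
        show PySem.List.insert ((u ++ [x]) ++ t :: ts) ((i - 1) + k) "," = _
        have hpos : (i - 1) + k = ((u.length : Nat) : Int) := by omega
        rw [hpos, PySem.List.insert_natCast _ _ _ (by simp)]
        rw [show (u ++ [x]) ++ t :: ts = u ++ (x :: t :: ts) by simp]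
        rw [List.take_left, List.drop_left]
        simp
      rw [hins, ih (pvUpd p t) t (u ++ [",", x]) (k + 1) (i + 1) (by simp only [List.length_append, List.length_cons, List.length_nil]; push_cast; omega)]
      simp [pvWvR, hc]
    · have hidx : pvIdxs p i (t :: ts) = pvIdxs (pvUpd p t) (i + 1) ts := by
        simp [pvIdxs, hc]
      rw [hidx]
      rw [show (u ++ [x]) ++ t :: ts = ((u ++ [x]) ++ [t]) ++ ts by simp]
      rw [ih (pvUpd p t) t (u ++ [x]) k (i + 1) (by simp only [List.length_append, List.length_cons, List.length_nil]; push_cast; omega)]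
      simp [pvWvR, hc]

theorem pvMapA_eq (t : String) :
    (if pvCoinMapping.contains t then pvCoinMapping.getD t "" else t) = pvMap t := by
  unfold pvMap
  by_cases h : pvCoinMapping.contains t = true
  · rcases ho : pvCoinMapping.get? t with _ | v
    · rw [PySem.Dict.contains_eq_isSome_get?, ho] at h
      simp at h
    · rw [h]
      rw [PySem.Dict.getD_eq_get?_getD, PySem.Dict.getD_eq_get?_getD, ho]
      rfl
  · have h2 : pvCoinMapping.get? t = none := by
      rw [PySem.Dict.contains_eq_isSome_get?] at h
      exact Option.not_isSome_iff_eq_none.mp h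
    simp [h]
    rw [PySem.Dict.getD_eq_get?_getD, h2]
    rfl

theorem pvMapComma : pvMap "," = "," := by decide

theorem pvMapWvR : ∀ (ts : List String) (x p : String),
    (pvWvR x p ts).map pvMap = pvWv (pvMap x) p ts := by
  intro ts
  induction ts with
  | nil => intro x p; simp [pvWvR, pvWv]
  | cons t ts ih =>
    intro x p
    by_cases hc : pvCond p t <;>
      simp [pvWvR, pvWv, hc, ih, pvMapComma]

theorem pvB : ∀ (ts : List String) (acc : List String) (x p : String),
    (ts.foldl pvStepB (acc ++ [x], p)).1 = acc ++ pvWv x p ts := by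
  intro ts
  induction ts with
  | nil => intro acc x p; simp [pvWv]
  | cons t ts ih =>
    intro acc x p
    simp only [List.foldl_cons]
    by_cases hc : pvCond p t
    · have hstep : pvStepB (acc ++ [x], p) t
          = ((acc ++ [",", x]) ++ [pvCoinMapping.getD t t], pvUpd p t) := by
        simp only [pvStepB, pvUpd]
        have hcc : (pvHierarchy.contains p && pvHierarchy.contains t
            && decide (pvHierarchy.getD p 0 ≤ pvHierarchy.getD t 0)) = true := hc
        rw [hcc]
        simp only [if_true]
        have hlen : ((acc ++ [x]).length : Int) - 1 = ((acc.length : Nat) : Int) := by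
          simp
        rw [hlen, PySem.List.insert_natCast _ _ _ (by simp)]
        rw [List.take_left, List.drop_left]
      rw [hstep, ih]
      simp [pvWv, hc, pvMap]
    · have hstep : pvStepB (acc ++ [x], p) t
          = ((acc ++ [x]) ++ [pvCoinMapping.getD t t], pvUpd p t) := by
        simp only [pvStepB, pvUpd]
        have hcc : (pvHierarchy.contains p && pvHierarchy.contains t
            && decide (pvHierarchy.getD p 0 ≤ pvHierarchy.getD t 0)) = false := by
          simpa [pvCond] using hc
        rw [hcc]
        simp
      rw [hstep, ih]
      simp [pvWv, hc, pvMap]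

-- A's mapping loop is List.map pvMap
theorem pvMapLoop (xs : List String) :
    xs.foldl (fun acc token =>
      if pvCoinMapping.contains token then acc ++ [pvCoinMapping.getD token ""]
      else acc ++ [token]) [] = xs.map pvMap := by
  have hbody : (fun acc token =>
      if pvCoinMapping.contains token then acc ++ [pvCoinMapping.getD token ""]
      else acc ++ [token]) = fun (acc : List String) token => acc ++ [pvMap token] := by
    funext acc token
    by_cases h : pvCoinMapping.contains token = true <;>
      simp only [h, if_true] <;>
      rw [← pvMapA_eq token] <;> simp [h]
  rw [hbody]
  simpa using PySem.List.foldl_append_singleton_eq_map pvMap xs []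

theorem pvCondEmpty (t : String) : pvCond "" t = false := by
  simp [pvCond, show pvHierarchy.contains "" = false from by decide]

-- ===== VERDICT (by name: the statement is the Claim_ definition above) =====
theorem coin_splitter_spec : Claim_equal_coin_splitter := by
  intro text _
  show coin_splitter text = coin_splitter_alt text
  simp only [coin_splitter, coin_splitter_alt]
  generalize (PySem.Str.split? text " ").getD [] = ts
  cases ts with
  | nil => rfl
  | cons t rest =>
    show PySem.Str.join " "
        (List.foldl (fun acc token =>
            if pvCoinMapping.contains token then acc ++ [pvCoinMapping.getD token ""]
            else acc ++ [token]) []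
          (List.foldl (fun s i => pvStep2 s i (PySem.List.pyGetD
                (([] : List Int) ++ (List.foldl (fun s i => pvStep1 s i
                    (PySem.List.pyGetD (([] : List String) ++ t :: rest) i ""))
                  ("", [])
                  (PySem.List.pyRange ((([] : List String).length : Nat) : Int)
                    ((((([] : List String) ++ t :: rest).length : Nat) : Int)))).2) i 0))
            (t :: rest)
            (PySem.List.pyRange ((([] : List Int).length : Nat) : Int)
              ((((([] : List Int) ++ (List.foldl (fun s i => pvStep1 s i
                    (PySem.List.pyGetD (([] : List String) ++ t :: rest) i ""))
                  ("", [])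
                  (PySem.List.pyRange ((([] : List String).length : Nat) : Int)
                    ((((([] : List String) ++ t :: rest).length : Nat) : Int)))).2).length : Nat) : Int)))))
      = PySem.Str.join " " (List.foldl pvStepB ([], "") (t :: rest)).1
    rw [pvIdxFold "" pvStep1 (t :: rest) ([] : List String) ("", [])]
    rw [pvZF1]
    rw [pvIdxFold 0 pvStep2 _ ([] : List Int) (t :: rest)]
    have h0 : (List.foldl pvUpd "" (t :: rest), ([] : List Int) ++ pvIdxs "" ((([] : List String).length : Nat) : Int) (t :: rest)).2
        = pvIdxs (pvUpd "" t) 1 rest := by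
      simp [pvIdxs, pvCondEmpty]
    rw [h0]
    rw [show pvZF pvStep2 ((([] : List Int).length : Nat) : Int) (pvIdxs (pvUpd "" t) 1 rest) (t :: rest)
        = ([] : List String) ++ pvWvR t (pvUpd "" t) rest from
      pvIns rest (pvUpd "" t) t [] 0 1 (by simp)]
    rw [pvMapLoop, List.nil_append, pvMapWvR]
    rw [List.foldl_cons]
    have hB1 : pvStepB ([], "") t = (([] : List String) ++ [pvMap t], pvUpd "" t) := by
      simp [pvStepB, pvUpd, pvMap, show pvHierarchy.contains "" = false from by decide]
    rw [hB1, pvB]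
    rw [List.nil_append]
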